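-- pv_equiv track=rewrite | github.com/blackSquare225/RdD | workflow/scripts/run_v2.py | cluster_deletions
-- ===== SOURCE A (Python) =====
-- from collections import defaultdict
--
-- def cluster_deletions(deletions, tolerance=100):
--     deletions.sort(key=lambda x: (x[0], x[1], x[2]))
--     parent = list(range(len(deletions)))
--     rank = [0] * len(deletions)
--
--     def find(x):
--         if parent[x] != x:
--             parent[x] = find(parent[x])
--         return parent[x]
--
--     def union(x, y):
--         root_x = find(x)
--         root_y = find(y)
--         if root_x != root_y:
--             if rank[root_x] > rank[root_y]:
--                 parent[root_y] = root_x
--             elif rank[root_x] < rank[root_y]: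
--                 parent[root_x] = root_y
--             else:
--                 parent[root_y] = root_x
--                 rank[root_x] += 1
--
--     for i in range(len(deletions)):
--         for j in range(i + 1, len(deletions)):
--             if deletions[i][0] != deletions[j][0]:
--                 break
--             if abs(deletions[i][1] - deletions[j][1]) <= tolerance and abs(deletions[i][2] - deletions[j][2]) <= tolerance:
--                 union(i, j)
--
--     clusters = defaultdict(list)
--     for i in range(len(deletions)):
--         root = find(i)
--         clusters[root].append(deletions[i])
--
--     return list(clusters.values())
-- ===== SOURCE B (Python) =====
-- # Same clustering, but: plain sort (tuples compare lexicographically), the inner scan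
-- # stops as soon as the sorted start-gap exceeds the tolerance (valid because starts are
-- # nondecreasing within a chromosome), and groups are built with a first-occurrence index
-- # table instead of a defaultdict.  Sorts `deletions` in place, exactly like the original.
-- def cluster_deletions(deletions, tolerance=100):
--     deletions.sort()
--     n = len(deletions)
--     parent = list(range(n))
--     rank = [0] * n
--
--     def find(x):
--         if parent[x] != x:
--             parent[x] = find(parent[x])
--         return parent[x]
--
--     def union(x, y):
--         rx, ry = find(x), find(y)
--         if rx == ry:
--             return
--         if rank[rx] < rank[ry]:
--             rx, ry = ry, rx
--         parent[ry] = rx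
--         if rank[rx] == rank[ry]:
--             rank[rx] += 1
--
--     for i in range(n):
--         j = i + 1
--         while j < n and deletions[j][0] == deletions[i][0] and deletions[j][1] - deletions[i][1] <= tolerance:
--             if abs(deletions[j][2] - deletions[i][2]) <= tolerance:
--                 union(i, j)
--             j += 1
--
--     seen = {}
--     groups = []
--     for i in range(n):
--         r = find(i)
--         if r in seen:
--             groups[seen[r]].append(deletions[i])
--         else:
--             seen[r] = len(groups)
--             groups.append([deletions[i]])
--     return groups
-- ===== Notes on version B (the rewrite author's own statement) =====
-- stated objective: alternative
-- what changed: The all-pairs inner scan per chromosome is replaced by a sorted sliding window that stops once the start-coordinate gap exceeds the tolerance (valid since starts are nondecreasing within a chromosome after sorting), the union helper is rewritten as swap-then-link, and the defaultdict grouping is replaced by a first-occurrence index table.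
import Mathlib
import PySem

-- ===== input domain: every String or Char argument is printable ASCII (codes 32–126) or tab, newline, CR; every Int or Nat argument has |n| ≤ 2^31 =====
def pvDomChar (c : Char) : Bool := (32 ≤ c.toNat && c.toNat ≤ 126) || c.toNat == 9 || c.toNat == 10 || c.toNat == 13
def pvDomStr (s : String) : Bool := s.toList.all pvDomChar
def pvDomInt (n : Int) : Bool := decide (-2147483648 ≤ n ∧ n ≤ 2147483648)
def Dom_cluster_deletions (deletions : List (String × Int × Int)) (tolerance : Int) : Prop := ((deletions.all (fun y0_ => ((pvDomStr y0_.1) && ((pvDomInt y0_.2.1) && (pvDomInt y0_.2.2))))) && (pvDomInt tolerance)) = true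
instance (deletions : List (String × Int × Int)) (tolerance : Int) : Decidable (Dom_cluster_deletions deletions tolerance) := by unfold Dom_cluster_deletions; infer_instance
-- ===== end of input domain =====

-- ===== PORT A =====
-- B replaces the all-pairs inner scan by a sorted sliding window and the defaultdict
-- grouping by a first-occurrence index table; both versions sort `deletions` in place
-- (equivalence proved about the return value).
-- Shared notation: a deletion record.
abbrev Del : Type := String × Int × Int

-- Python's sort key (x[0], x[1], x[2]) — tuples compare lexicographically.
def pvKey (x : Del) : Lex (String × Lex (Int × Int)) := toLex (x.1, toLex (x.2.1, x.2.2))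

-- d[k] for an index the loop keeps in range (default never read).
def nthD (d : List Del) (k : Nat) : Del := d.getD k ("", 0, 0)

-- `find` with path compression — the identical helper appears in Source A and Source B.
-- fuel bounds the recursion depth; Python's parent chains are acyclic and shorter
-- than len(parent), so fuel = len(parent) is always enough.
def ufFind (fuel : Nat) (parent : List Int) (x : Int) : List Int × Int :=
  match fuel with
  | 0 => (parent, x)      -- unreachable in Python (chain length < fuel at every call)
  | f + 1 =>
    let px := PySem.List.pyGetD parent x 0    -- x is always a valid index
    if px = x then (parent, x)
    else
      let pr := ufFind f parent px
      (pr.1.set x.toNat pr.2, pr.2)           -- parent[x] = find(parent[x]); return parent[x]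

-- Source A's union: find both roots, three-way comparison on rank.
def ufUnion (fuel : Nat) (parent rank : List Int) (x y : Int) : List Int × List Int :=
  let f1 := ufFind fuel parent x
  let f2 := ufFind fuel f1.1 y
  if f1.2 ≠ f2.2 then
    let rkx := PySem.List.pyGetD rank f1.2 0
    let rky := PySem.List.pyGetD rank f2.2 0
    if rkx > rky then (f2.1.set f2.2.toNat f1.2, rank)
    else if rkx < rky then (f2.1.set f1.2.toNat f2.2, rank)
    else (f2.1.set f2.2.toNat f1.2, rank.set f1.2.toNat (rkx + 1))
  else (f2.1, rank)

-- A's inner `for j in range(i+1, n)` with the chromosome `break`.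
def innerA (d : List Del) (tol : Int) (n i j : Nat) (st : List Int × List Int) :
    List Int × List Int :=
  if h : j < n then
    if (nthD d i).1 ≠ (nthD d j).1 then st    -- break
    else
      let st' := if |(nthD d i).2.1 - (nthD d j).2.1| ≤ tol ∧ |(nthD d i).2.2 - (nthD d j).2.2| ≤ tol
        then ufUnion n st.1 st.2 (i : Int) (j : Int) else st
      innerA d tol n i (j + 1) st'
  else st
  termination_by n - j
  decreasing_by omega

-- A's outer `for i in range(n)`.
def outerA (d : List Del) (tol : Int) (n i : Nat) (st : List Int × List Int) :
    List Int × List Int :=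
  if h : i < n then outerA d tol n (i + 1) (innerA d tol n i (i + 1) st) else st
  termination_by n - i
  decreasing_by omega

-- A's grouping loop: clusters = defaultdict(list); clusters[find(i)].append(d[i]).
def groupA (d : List Del) (n i : Nat) (parent : List Int) (cl : PySem.Dict Int (List Del)) :
    List (List Del) :=
  if h : i < n then
    let fr := ufFind n parent (i : Int)
    groupA d n (i + 1) fr.1 (cl.modify fr.2 [] (· ++ [nthD d i]))
  else cl.values
  termination_by n - i
  decreasing_by omega

def cluster_deletions (deletions : List (String × Int × Int)) (tolerance : Int) :
    List (List (String × Int × Int)) :=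
  let d := PySem.List.sorted deletions pvKey
  let n := d.length
  let st := outerA d tolerance n 0 (PySem.List.pyRange 0 (n : Int) 1, List.replicate n (0 : Int))
  groupA d n 0 st.1 PySem.Dict.empty

-- ===== PORT B =====
-- Source B's union: swap roots so rx has the larger rank, then a single link.
def ufLink (fuel : Nat) (parent rank : List Int) (x y : Int) : List Int × List Int :=
  let f1 := ufFind fuel parent x
  let f2 := ufFind fuel f1.1 y
  if f1.2 = f2.2 then (f2.1, rank)
  else
    let rp := if PySem.List.pyGetD rank f1.2 0 < PySem.List.pyGetD rank f2.2 0
      then (f2.2, f1.2) else (f1.2, f2.2)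
    let p := f2.1.set rp.2.toNat rp.1        -- parent[ry] = rx
    let rk := if PySem.List.pyGetD rank rp.1 0 = PySem.List.pyGetD rank rp.2 0
      then rank.set rp.1.toNat (PySem.List.pyGetD rank rp.1 0 + 1) else rank
    (p, rk)

-- Source B's sliding-window `while`: stop at a new chromosome or start-gap > tolerance.
def innerB (d : List Del) (tol : Int) (n i j : Nat) (st : List Int × List Int) :
    List Int × List Int :=
  if h : j < n then
    if (nthD d j).1 = (nthD d i).1 ∧ (nthD d j).2.1 - (nthD d i).2.1 ≤ tol then
      let st' := if |(nthD d j).2.2 - (nthD d i).2.2| ≤ tol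
        then ufLink n st.1 st.2 (i : Int) (j : Int) else st
      innerB d tol n i (j + 1) st'
    else st
  else st
  termination_by n - j
  decreasing_by omega

-- Source B's grouping: seen maps a root to its group's position, groups grows in place.
def groupB (d : List Del) (n i : Nat) (parent : List Int) (seen : PySem.Dict Int Int)
    (groups : List (List Del)) : List (List Del) :=
  if h : i < n then
    let fr := ufFind n parent (i : Int)
    match seen.get? fr.2 with
    | some k => groupB d n (i + 1) fr.1 seen
        (groups.set k.toNat (groups.getD k.toNat [] ++ [nthD d i]))   -- k is a valid index
    | none => groupB d n (i + 1) fr.1 (seen.insert fr.2 (groups.length : Int))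
        (groups ++ [[nthD d i]])
  else groups
  termination_by n - i
  decreasing_by all_goals omega

def cluster_deletions_alt (deletions : List (String × Int × Int)) (tolerance : Int) :
    List (List (String × Int × Int)) :=
  let d := PySem.List.sorted deletions pvKey    -- .sort(): plain tuple order = same key
  let n := d.length
  let st := (List.range n).foldl (fun st i => innerB d tolerance n i (i + 1) st)
    (PySem.List.pyRange 0 (n : Int) 1, List.replicate n (0 : Int))
  groupB d n 0 st.1 PySem.Dict.empty []

-- ===== PRECONDITION & SPEC =====
def Spec_cluster_deletions (deletions : List (String × Int × Int)) (tolerance : Int) (out : List (List (String × Int × Int))) : Prop := out = cluster_deletions_alt deletions tolerance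
instance (deletions : List (String × Int × Int)) (tolerance : Int) (out : List (List (String × Int × Int))) : Decidable (Spec_cluster_deletions deletions tolerance out) := by unfold Spec_cluster_deletions; infer_instance

-- ===== CLAIM (what is proved, stated in full; the proofs are below) =====
def Claim_equal_cluster_deletions : Prop := ∀ (deletions : List (String × Int × Int)) (tolerance : Int), Dom_cluster_deletions deletions tolerance → Spec_cluster_deletions deletions tolerance (cluster_deletions deletions tolerance)

-- ===== LEMMAS AND PROOFS =====

-- Source B's swap-style union computes exactly Source A's three-branch union.
theorem ufLink_eq_ufUnion (fuel : Nat) (parent rank : List Int) (x y : Int) :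
    ufLink fuel parent rank x y = ufUnion fuel parent rank x y := by
  unfold ufLink ufUnion
  rcases hf1 : ufFind fuel parent x with ⟨p1, r1⟩
  rcases hf2 : ufFind fuel p1 y with ⟨p2, r2⟩
  simp only [hf2]
  by_cases hroot : r1 = r2
  · simp [hroot]
  · rcases lt_trichotomy (PySem.List.pyGetD rank r1 0) (PySem.List.pyGetD rank r2 0) with hlt | heq | hgt
    · simp [hroot, hlt, not_lt.mpr (le_of_lt hlt), hlt.ne']
    · simp [hroot, heq]
    · simp [hroot, hgt, not_lt.mpr (le_of_lt hgt), hgt.ne']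

-- If from j on every same-chromosome entry has start-gap > tol, A's scan is a no-op.
theorem innerA_skip (d : List Del) (tol : Int) (n i : Nat) :
    ∀ j st, (∀ j', j ≤ j' → j' < n → (nthD d j').1 = (nthD d i).1 →
        tol < (nthD d j').2.1 - (nthD d i).2.1) →
    innerA d tol n i j st = st := by
  intro j st hall
  induction hfuel : n - j using Nat.strong_induction_on generalizing j st with
  | _ m ih =>
    rw [innerA]
    split
    · rename_i hj
      by_cases hc : (nthD d i).1 ≠ (nthD d j).1
      · simp [hc]
      · rw [not_not] at hc
        have hgap := hall j le_rfl hj hc.symm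
        have hcond : ¬ (|(nthD d i).2.1 - (nthD d j).2.1| ≤ tol ∧ |(nthD d i).2.2 - (nthD d j).2.2| ≤ tol) := by
          rintro ⟨h1, -⟩
          have : (nthD d j).2.1 - (nthD d i).2.1 ≤ |(nthD d i).2.1 - (nthD d j).2.1| := by
            rw [abs_sub_comm]; exact le_abs_self _
          omega
        simp only [hc, ne_eq, not_true_eq_false, if_false, hcond]
        exact ih (n - (j+1)) (by omega) (j+1) st (fun j' hj' hjn hch => hall j' (by omega) hjn hch) rfl
    · rfl

-- key-monotonicity of the sorted list, packaged for the loops.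
def Mono (d : List Del) (n : Nat) : Prop :=
  ∀ p q : Nat, p ≤ q → q < n → pvKey (nthD d p) ≤ pvKey (nthD d q)

-- within one chromosome the sort key orders the start coordinates.
theorem key_start_le (a b : Del) (hc : b.1 = a.1) (h : pvKey a ≤ pvKey b) :
    a.2.1 ≤ b.2.1 := by
  unfold pvKey at h
  rw [Prod.Lex.toLex_le_toLex] at h
  rcases h with h | ⟨-, h⟩
  · rw [hc] at h; exact absurd h (lt_irrefl _)
  · rw [Prod.Lex.toLex_le_toLex] at h
    rcases h with h | ⟨h, -⟩
    · exact le_of_lt h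
    · exact le_of_eq h

theorem inner_eq (d : List Del) (tol : Int) (n : Nat)
    (hm : Mono d n) (i : Nat) :
    ∀ j st, i ≤ j → innerA d tol n i j st = innerB d tol n i j st := by
  intro j st hij
  induction hfuel : n - j using Nat.strong_induction_on generalizing j st with
  | _ m ih =>
    rw [innerB]
    split
    · rename_i hj
      by_cases hch : (nthD d j).1 = (nthD d i).1
      · by_cases hgap : (nthD d j).2.1 - (nthD d i).2.1 ≤ tol
        · -- inside the window: both sides test the end coordinate and advance
          have hstart : (nthD d i).2.1 ≤ (nthD d j).2.1 :=
            key_start_le _ _ hch (hm i j hij hj)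
          have habs1 : |(nthD d i).2.1 - (nthD d j).2.1| ≤ tol := by
            rw [abs_sub_comm, abs_of_nonneg (by omega)]; omega
          have habs2 : |(nthD d i).2.2 - (nthD d j).2.2| = |(nthD d j).2.2 - (nthD d i).2.2| :=
            abs_sub_comm _ _
          have hrec : ∀ st', innerA d tol n i (j+1) st' = innerB d tol n i (j+1) st' :=
            fun st' => ih (n - (j+1)) (by omega) (j+1) st' (by omega) rfl
          rw [innerA, dif_pos hj]
          by_cases hend : |(nthD d j).2.2 - (nthD d i).2.2| ≤ tol
          · simp only [hch, hgap, ne_eq, not_true_eq_false, if_false, hend, habs1, habs2,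
              and_self, if_true, ufLink_eq_ufUnion]
            exact hrec _
          · simp only [hch, hgap, ne_eq, not_true_eq_false, if_false, hend, habs2, and_false,
              and_self, if_true]
            exact hrec _
        · -- start-gap exceeded: B stops, A's remaining scan is a no-op
          have hall : ∀ j', j ≤ j' → j' < n → (nthD d j').1 = (nthD d i).1 →
              tol < (nthD d j').2.1 - (nthD d i).2.1 := by
            intro j' hjj' hj'n hch'
            have hkey : pvKey (nthD d j) ≤ pvKey (nthD d j') := hm j j' hjj' hj'n
            have : (nthD d j).2.1 ≤ (nthD d j').2.1 :=
              key_start_le _ _ (by rw [hch', hch]) hkey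
            omega
          rw [innerA_skip d tol n i j st hall]
          simp [hgap]
      · -- new chromosome: A breaks, B's condition is false
        rw [innerA, dif_pos hj]
        simp [hch, Ne.symm hch]
    · rename_i hj
      rw [innerA, dif_neg hj]

theorem outer_eq (d : List Del) (tol : Int) (n : Nat) (hn : n ≤ d.length)
    (hm : Mono d n) :
    ∀ k st, outerA d tol n k st =
      (List.range' k (n - k)).foldl (fun st i => innerB d tol n i (i + 1) st) st := by
  intro k st
  induction hfuel : n - k using Nat.strong_induction_on generalizing k st with
  | _ m ih =>
    rw [outerA]
    split
    · rename_i hk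
      have hsplit : m = (n - (k+1)) + 1 := by omega
      rw [hsplit, List.range'_succ, List.foldl_cons]
      rw [inner_eq d tol n hm k (k+1) st (by omega)]
      exact ih (n - (k+1)) (by omega) (k+1) _ rfl
    · rename_i hk
      have hz : m = 0 := by omega
      rw [hz]
      rfl

-- first-occurrence index of r in ks, counting from acc (what Source B's `seen` stores).
def idxI (ks : List Int) (r acc : Int) : Option Int :=
  match ks with
  | [] => none
  | a :: t => if a = r then some acc else idxI t r (acc + 1)

theorem idxI_append (ks : List Int) (a r acc : Int) :
    idxI (ks ++ [a]) r acc =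
      match idxI ks r acc with
      | some k => some k
      | none => if a = r then some (acc + ks.length) else none := by
  induction ks generalizing acc with
  | nil => simp [idxI]
  | cons b t ih =>
    by_cases hb : b = r
    · simp [idxI, hb]
    · simp only [List.cons_append, idxI, hb, if_false, ih (acc + 1), List.length_cons]
      cases idxI t r (acc + 1) with
      | some k => rfl
      | none =>
        simp only []
        split
        · congr 1; push_cast; ring
        · rfl

theorem idxI_none_iff (ks : List Int) (r : Int) (acc : Int) :
    idxI ks r acc = none ↔ r ∉ ks := by
  induction ks generalizing acc with
  | nil => simp [idxI]
  | cons b t ih =>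
    by_cases hb : b = r
    · simp [idxI, hb]
    · simp [idxI, hb, ih (acc + 1), Ne.symm hb]

theorem idxI_some_spec (ks : List Int) (r acc k : Int) (h : idxI ks r acc = some k) :
    ∃ j : Nat, k = acc + j ∧ j < ks.length ∧ ks[j]! = r ∧ ∀ j' : Nat, j' < j → ks[j']! ≠ r := by
  induction ks generalizing acc with
  | nil => simp [idxI] at h
  | cons b t ih =>
    by_cases hb : b = r
    · refine ⟨0, ?_, by simp, by simpa using hb, by omega⟩
      simp [idxI, hb] at h
      omega
    · simp only [idxI, hb, if_false] at h
      obtain ⟨j, hk, hj, hr, hfirst⟩ := ih (acc + 1) h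
      refine ⟨j + 1, by omega, by simp; omega, by simpa using hr, ?_⟩
      intro j' hj'
      cases j' with
      | zero => simpa using hb
      | succ j'' => simpa using hfirst j'' (by omega)

-- the defaultdict update on an existing key, seen on the items list.
theorem map_if_eq_set (its : List (Int × List Del)) (r : Int) (v : List Del) (j : Nat)
    (hj : j < its.length) (hr : (its[j]'hj).1 = r) (hnd : (its.map (·.1)).Nodup) :
    its.map (fun p => if p.1 == r then (r, v) else p) = its.set j (r, v) := by
  induction its generalizing j with
  | nil => simp at hj
  | cons p t ih =>
    rw [List.map_cons, List.nodup_cons] at hnd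
    obtain ⟨hhead, hndt⟩ := hnd
    cases j with
    | zero =>
      simp only [List.getElem_cons_zero] at hr
      simp only [List.map_cons, hr, BEq.rfl, if_true, List.set_cons_zero]
      congr 1
      have : ∀ q ∈ t, (if q.1 == r then (r, v) else q) = q := by
        intro q hq
        have : q.1 ≠ r := by
          intro he
          refine hhead ?_
          have : p.1 = q.1 := by rw [hr, he]
          rw [this]
          exact List.mem_map_of_mem hq
        simp [this]
      rw [List.map_congr_left this]
      simp
    | succ j' =>
      simp only [List.length_cons, Nat.add_lt_add_iff_right] at hj
      simp only [List.getElem_cons_succ] at hr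
      have hpr : p.1 ≠ r := by
        intro he
        have hrmem : r ∈ t.map (·.1) := by
          rw [← hr]; exact List.mem_map_of_mem (List.getElem_mem _)
        rw [he] at hhead
        exact hhead hrmem
      simp only [List.map_cons, List.set_cons_succ]
      rw [if_neg (by simpa using hpr)]
      congr 1
      exact ih j' hj hr hndt

theorem get?_mk_of_first (its : List (Int × List Del)) (r : Int) (j : Nat)
    (hj : j < its.length) (hr : (its[j]'hj).1 = r)
    (hfirst : ∀ j' : Nat, (h : j' < j) → (its[j']'(by omega)).1 ≠ r) :
    (PySem.Dict.mk its).get? r = some (its[j]'hj).2 := by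
  induction its generalizing j with
  | nil => simp at hj
  | cons p t ih =>
    cases j with
    | zero =>
      simp only [List.getElem_cons_zero] at hr ⊢
      rw [PySem.Dict.get?_mk_cons, if_pos (by simpa using hr)]
    | succ j' =>
      have hpr : p.1 ≠ r := by simpa using hfirst 0 (Nat.succ_pos _)
      rw [PySem.Dict.get?_mk_cons, if_neg (by simpa using hpr)]
      simp only [List.length_cons, Nat.add_lt_add_iff_right] at hj
      simp only [List.getElem_cons_succ] at hr ⊢
      exact ih j' hj hr (fun j'' h => by simpa using hfirst (j''+1) (by omega))

-- the two grouping loops agree, given seen = first-occurrence table of the keys.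
theorem group_eq (d : List Del) (n : Nat) :
    ∀ i parent (its : List (Int × List Del)) (seen : PySem.Dict Int Int),
    (its.map (·.1)).Nodup →
    (∀ r, seen.get? r = idxI (its.map (·.1)) r 0) →
    groupA d n i parent (PySem.Dict.mk its) = groupB d n i parent seen (its.map (·.2)) := by
  intro i parent its seen hnd hseen
  induction hfuel : n - i using Nat.strong_induction_on generalizing i parent its seen with
  | _ m ih =>
    rw [groupA, groupB]
    split
    · rename_i hi
      have hrec := fun its' seen' hnd' hseen' =>
        ih (n - (i+1)) (by omega) (i+1) (ufFind n parent (i : Int)).1 its' seen' hnd' hseen' rfl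
      simp only []
      set r := (ufFind n parent (i : Int)).2 with hr
      set x := nthD d i with hx
      cases hidx : idxI (its.map (·.1)) r 0 with
      | some k =>
        rw [hseen r, hidx]
        simp only []
        obtain ⟨j, hk, hj, hkey, hfirst⟩ := idxI_some_spec _ _ _ _ hidx
        rw [List.length_map] at hj
        have hkey' : (its[j]'hj).1 = r := by
          have := hkey
          rwa [getElem!_pos _ _ (by simpa using hj), List.getElem_map] at this
        have hfirst' : ∀ j' : Nat, (h : j' < j) → (its[j']'(by omega)).1 ≠ r := by
          intro j' h
          have := hfirst j' h
          rwa [getElem!_pos _ _ (by simp; omega), List.getElem_map] at this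
        have hget : (PySem.Dict.mk its).get? r = some (its[j]'hj).2 :=
          get?_mk_of_first its r j hj hkey' hfirst'
        have hcont : (PySem.Dict.mk its).contains r = true := by
          rw [PySem.Dict.contains_iff_mem_keys]
          show r ∈ (PySem.Dict.mk its).items.map (·.1)
          rw [← hkey']
          exact List.mem_map_of_mem (List.getElem_mem _)
        have hmod : (PySem.Dict.mk its).modify r [] (· ++ [x]) =
            PySem.Dict.mk (its.set j (r, (its[j]'hj).2 ++ [x])) := by
          apply PySem.Dict.ext
          show ((PySem.Dict.mk its).insert r _).items = _
          rw [PySem.Dict.items_insert_of_contains _ _ hcont]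
          show its.map (fun p => if p.1 == r then (r, _) else p) = _
          rw [PySem.Dict.getD_eq_get?_getD, hget]
          exact map_if_eq_set its r _ j hj hkey' hnd
        rw [hmod]
        have hknat : k.toNat = j := by omega
        have hgetD : (its.map (·.2)).getD k.toNat [] = (its[j]'hj).2 := by
          rw [hknat, List.getD_eq_getElem _ _ (by simpa using hj), List.getElem_map]
        have hgroups : (its.map (·.2)).set k.toNat ((its.map (·.2)).getD k.toNat [] ++ [x]) =
            (its.set j (r, (its[j]'hj).2 ++ [x])).map (·.2) := by
          rw [hgetD, hknat, List.map_set]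
        rw [hgroups]
        apply hrec
        · have : (its.set j (r, (its[j]'hj).2 ++ [x])).map (·.1) = its.map (·.1) := by
            rw [List.map_set]
            show (its.map (·.1)).set j r = _
            rw [← hkey']
            have : (its.map (·.1))[j]'(by simpa using hj) = (its[j]'hj).1 := List.getElem_map _
            rw [← this, List.set_getElem_self]
          rw [this]; exact hnd
        · intro r'
          have : (its.set j (r, (its[j]'hj).2 ++ [x])).map (·.1) = its.map (·.1) := by
            rw [List.map_set]
            show (its.map (·.1)).set j r = _
            rw [← hkey']
            have : (its.map (·.1))[j]'(by simpa using hj) = (its[j]'hj).1 := List.getElem_map _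
            rw [← this, List.set_getElem_self]
          rw [this]; exact hseen r'
      | none =>
        rw [hseen r, hidx]
        simp only []
        have hnmem : r ∉ its.map (·.1) := (idxI_none_iff _ _ _).mp hidx
        have hcont : (PySem.Dict.mk its).contains r = false := by
          rw [← Bool.not_eq_true, PySem.Dict.contains_iff_mem_keys]
          exact hnmem
        have hget : (PySem.Dict.mk its).get? r = none := by
          rw [PySem.Dict.get?_eq_none_iff_not_mem_keys]
          exact hnmem
        have hmod : (PySem.Dict.mk its).modify r [] (· ++ [x]) =
            PySem.Dict.mk (its ++ [(r, [x])]) := by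
          apply PySem.Dict.ext
          show ((PySem.Dict.mk its).insert r _).items = _
          rw [PySem.Dict.items_insert_of_not_contains _ _ hcont]
          rw [PySem.Dict.getD_eq_get?_getD, hget]
          rfl
        rw [hmod]
        have happ : (its.map (·.2)) ++ [[x]] = (its ++ [(r, [x])]).map (·.2) := by
          simp
        rw [happ]
        apply hrec
        · rw [List.map_append]
          simp only [List.map_cons, List.map_nil]
          rw [List.nodup_append]
          refine ⟨hnd, List.nodup_singleton _, ?_⟩
          intro a ha b hb
          simp only [List.mem_singleton] at hb
          rw [hb]
          exact fun heq => hnmem (heq ▸ ha)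
        · intro r'
          rw [List.map_append]
          simp only [List.map_cons, List.map_nil]
          rw [PySem.Dict.get?_insert, idxI_append]
          by_cases hrr : r' = r
          · subst hrr
            rw [hidx]
            simp
          · rw [if_neg hrr, hseen r']
            cases hidx' : idxI (its.map (·.1)) r' 0 with
            | some k => rfl
            | none =>
              simp only []
              rw [if_neg (fun h => hrr h.symm)]
    · show (PySem.Dict.mk its).values = its.map (·.2)
      rfl

-- ===== VERDICT (by name: the statement is the Claim_ definition above) =====
theorem cluster_deletions_spec : Claim_equal_cluster_deletions := by
  intro deletions tolerance _
  unfold Spec_cluster_deletions cluster_deletions cluster_deletions_alt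
  simp only []
  have hm : Mono (PySem.List.sorted deletions pvKey) (PySem.List.sorted deletions pvKey).length := by
    intro p q hpq hq
    unfold nthD
    rw [List.getD_eq_getElem _ _ (lt_of_le_of_lt hpq hq), List.getD_eq_getElem _ _ hq]
    exact PySem.List.key_sorted_getElem_mono deletions pvKey hpq hq
  rw [outer_eq _ tolerance _ le_rfl hm 0 _]
  rw [Nat.sub_zero, ← List.range_eq_range']
  exact group_eq _ _ 0 _ [] PySem.Dict.empty List.nodup_nil
    (fun r => by simp [PySem.Dict.get?_empty, idxI])
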